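-- pv_equiv track=rewrite | github.com/nyok0/-a2-472-2020-fall | a2_functions.py | generateSolutions
-- ===== SOURCE A (Python) =====
-- def generateSolutions(pformat):
--     height, width = pformat
--     ret = []
--
--     xcount = 0
--     s1 = []
--     for i in range(height):
--         for j in range(width):
--             xcount += 1
--             if(xcount != width * height):
--                 s1.append(str(xcount))
--             else:
--                 s1.append("0")
--     ret.append(s1)
--
--     xcount = 0
--     s2 = []
--     for i in range(height):
--         for j in range(width):
--             xcount += 1
--             if(xcount != width * height):
--                 s2.append(str(i + 1 + height * j))
--             else:
--                 s2.append("0")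
--     ret.append(s2)
--
--     return ret
-- ===== SOURCE B (Python) =====
-- def generateSolutions(pformat):
--     height, width = pformat
--     if height <= 0 or width <= 0:
--         return [[], []]
--     def grid(h, w):
--         return [[str(r * w + c + 1) for c in range(w)] for r in range(h)]
--     s1 = [v for row in grid(height, width) for v in row]
--     s2 = [v for col in zip(*grid(width, height)) for v in col]
--     s1[-1] = "0"
--     s2[-1] = "0"
--     return [s1, s2]
-- ===== Notes on version B (the rewrite author's own statement) =====
-- stated objective: alternative
-- what changed: B builds one reusable row-major 2D numbering grid helper and obtains s1 by flattening grid(height,width) and s2 by transposing grid(width,height) with zip(*...) and flattening, then overwrites the last cells with "0"; A runs two separate nested counting loops with an in-loop last-cell test.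
import Mathlib
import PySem

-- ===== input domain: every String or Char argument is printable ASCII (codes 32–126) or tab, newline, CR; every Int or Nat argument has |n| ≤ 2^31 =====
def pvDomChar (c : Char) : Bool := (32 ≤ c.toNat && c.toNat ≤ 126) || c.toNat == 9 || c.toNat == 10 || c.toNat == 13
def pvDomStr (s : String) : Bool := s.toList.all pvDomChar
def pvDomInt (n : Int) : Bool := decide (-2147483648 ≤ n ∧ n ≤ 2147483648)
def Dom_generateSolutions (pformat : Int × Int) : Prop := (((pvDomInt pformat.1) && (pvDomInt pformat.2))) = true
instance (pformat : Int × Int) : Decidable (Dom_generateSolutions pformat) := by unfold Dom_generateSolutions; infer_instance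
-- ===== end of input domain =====

-- B derives both labelings from one row-major numbering-grid helper (s2 by zip(*) transposition)
-- instead of A's two nested counting loops; objective: alternative decomposition, same cost.

-- ===== PORT A =====
def generateSolutions (pformat : Int × Int) : List (List String) :=
  let height := pformat.1
  let width := pformat.2
  let r1 := (PySem.List.pyRange 0 height 1).foldl (fun st _i =>
      (PySem.List.pyRange 0 width 1).foldl (fun (st : Int × List String) _j =>
        let x := st.1 + 1
        (x, st.2 ++ [if x ≠ width * height then PySem.Int.toStr x else "0"])) st)
    ((0 : Int), ([] : List String))
  let r2 := (PySem.List.pyRange 0 height 1).foldl (fun st i =>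
      (PySem.List.pyRange 0 width 1).foldl (fun (st : Int × List String) j =>
        let x := st.1 + 1
        (x, st.2 ++ [if x ≠ width * height then PySem.Int.toStr (i + 1 + height * j) else "0"])) st)
    ((0 : Int), ([] : List String))
  [r1.2, r2.2]

-- ===== PORT B =====
-- grid(h, w) = [[str(r*w+c+1) for c in range(w)] for r in range(h)]
def pvGrid (h w : Int) : List (List String) :=
  (PySem.List.pyRange 0 h 1).map (fun r =>
    (PySem.List.pyRange 0 w 1).map (fun c => PySem.Int.toStr (r * w + c + 1)))

-- zip(*rows): PySem has no variadic zip, so this is a hand port, exact for any list of rows: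
-- stop at the first exhausted row, otherwise emit the heads and recurse on the tails.
def pvZipStar (rows : List (List String)) : List (List String) :=
  if h : rows = [] ∨ rows.any (·.isEmpty) then []
  else (rows.map (fun r => r.head?.getD "")) :: pvZipStar (rows.map List.tail)
termination_by rows.headI.length
decreasing_by
  simp only [not_or] at h
  obtain ⟨h1, h2⟩ := h
  match rows, h1, h2 with
  | r :: rs, _, h2 =>
    cases r with
    | nil => simp at h2
    | cons a as => simp [List.headI]

-- s[-1] = "0" on the nonempty list is ported as dropLast ++ ["0"].
def generateSolutions_alt (pformat : Int × Int) : List (List String) :=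
  let height := pformat.1
  let width := pformat.2
  if height ≤ 0 ∨ width ≤ 0 then [[], []]
  else
    let s1 := (pvGrid height width).flatten
    let s2 := (pvZipStar (pvGrid width height)).flatten
    [s1.dropLast ++ ["0"], s2.dropLast ++ ["0"]]

-- ===== PRECONDITION & SPEC =====
def Spec_generateSolutions (pformat : Int × Int) (out : List (List String)) : Prop := out = generateSolutions_alt pformat
instance (pformat : Int × Int) (out : List (List String)) : Decidable (Spec_generateSolutions pformat out) := by unfold Spec_generateSolutions; infer_instance

-- ===== CLAIM (what is proved, stated in full; the proofs are below) =====
def Claim_equal_generateSolutions : Prop := ∀ (pformat : Int × Int), Dom_generateSolutions pformat → Spec_generateSolutions pformat (generateSolutions pformat)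

-- ===== LEMMAS AND PROOFS =====

-- inner loop of A: W steps incrementing the counter and appending F (new counter) j
theorem pv_inner_fold (W : Nat) (F : Int → Int → String) (x : Int) (acc : List String) :
    ((List.range W).map (Nat.cast : Nat → Int)).foldl
      (fun (st : Int × List String) j => (st.1 + 1, st.2 ++ [F (st.1 + 1) j])) (x, acc)
    = (x + W, acc ++ (List.range W).map (fun t : Nat => F (x + (t : Int) + 1) (t : Int))) := by
  induction W generalizing x acc with
  | zero => simp
  | succ W ih =>
    rw [List.range_succ, List.map_append, List.foldl_append, ih]
    simp only [List.map_cons, List.map_nil, List.foldl_cons, List.foldl_nil, List.map_append, Prod.mk.injEq, List.append_assoc]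
    refine ⟨by push_cast; ring, ?_⟩
    trivial

-- outer loop of A: H rows of W entries
theorem pv_outer_fold (H W : Nat) (G : Int → Int → Int → String) :
    ((List.range H).map (Nat.cast : Nat → Int)).foldl
      (fun st i => ((List.range W).map (Nat.cast : Nat → Int)).foldl
        (fun (st : Int × List String) j => (st.1 + 1, st.2 ++ [G (st.1 + 1) i j])) st)
      ((0 : Int), ([] : List String))
    = (((H * W : Nat) : Int),
       (List.range H).flatMap (fun i => (List.range W).map
         (fun t => G ((i * W + t : Nat) + 1) (i : Int) (t : Int)))) := by
  induction H with
  | zero => simp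
  | succ H ih =>
    rw [List.range_succ, List.map_append, List.foldl_append, ih]
    simp only [List.map_cons, List.map_nil, List.foldl_cons, List.foldl_nil]
    rw [pv_inner_fold W (fun x j => G x (H : Int) j)]
    rw [List.flatMap_append]
    simp only [Prod.mk.injEq, List.flatMap_cons, List.flatMap_nil, List.append_nil]
    refine ⟨by push_cast; ring, ?_⟩
    congr 1

-- flatten a row-major double range into a single flat range
theorem pv_flatten (H W : Nat) (g : Nat → String) :
    (List.range H).flatMap (fun i => (List.range W).map (fun t => g (i * W + t)))
    = (List.range (H * W)).map g := by
  induction H with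
  | zero => simp
  | succ H ih =>
    rw [List.range_succ, List.flatMap_append, ih, Nat.succ_mul, List.range_add,
        List.map_append, List.map_map]
    simp [Function.comp, Nat.add_comm]

-- replacing the last element by "0" vs an in-loop test for the last index
theorem pv_last_replace (N : Nat) (hN : 0 < N) (f : Nat → String) :
    (List.range N).map (fun k => if k + 1 = N then "0" else f k)
    = ((List.range N).map f).dropLast ++ ["0"] := by
  obtain ⟨M, rfl⟩ : ∃ M, N = M + 1 := ⟨N - 1, by omega⟩
  rw [List.range_succ, List.map_append, List.map_append]
  simp only [List.map_cons, List.map_nil, List.dropLast_concat]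
  congr 1
  apply List.map_congr_left
  intro k hk
  rw [List.mem_range] at hk
  rw [if_neg (by omega : ¬ k + 1 = M + 1)]

-- zip(*rows) is empty when every row is empty
theorem pvZipStar_all_nil (rows : List (List String)) (h : ∀ r ∈ rows, r = []) :
    pvZipStar rows = [] := by
  unfold pvZipStar
  rw [dif_pos]
  cases rows with
  | nil => left; rfl
  | cons r rs =>
    right
    simp only [List.any_cons, Bool.or_eq_true]
    left
    rw [h r (List.mem_cons_self)]
    rfl

-- zip(*) of a rectangular grid is its transpose
theorem pvZipStar_grid (m n : Nat) (hm : 0 < m) (F : Nat → Nat → String) :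
    pvZipStar ((List.range m).map (fun r => (List.range n).map (F r)))
    = (List.range n).map (fun c => (List.range m).map (fun r => F r c)) := by
  induction n generalizing F with
  | zero =>
    rw [pvZipStar_all_nil]
    · simp
    · intro r hr
      rw [List.mem_map] at hr
      obtain ⟨x, _, rfl⟩ := hr
      simp
  | succ n ih =>
    unfold pvZipStar
    rw [dif_neg]
    · have hsplit : ∀ r : Nat, (List.range (n + 1)).map (F r)
          = F r 0 :: (List.range n).map (fun c => F r (c + 1)) := by
        intro r
        rw [List.range_succ_eq_map]
        simp [List.map_map, Function.comp]
      have h1 : ((List.range m).map (fun r => (List.range (n+1)).map (F r))).map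
          (fun r => r.head?.getD "") = (List.range m).map (fun r => F r 0) := by
        rw [List.map_map]
        apply List.map_congr_left
        intro r _
        simp [Function.comp, hsplit r]
      have h2 : ((List.range m).map (fun r => (List.range (n+1)).map (F r))).map List.tail
          = (List.range m).map (fun r => (List.range n).map (fun c => F r (c + 1))) := by
        rw [List.map_map]
        apply List.map_congr_left
        intro r _
        simp [Function.comp, hsplit r]
      rw [h1, h2, ih (fun r c => F r (c + 1))]
      rw [List.range_succ_eq_map, List.map_cons, List.map_map]
      rfl
    · rw [not_or]
      constructor
      · simp [List.range_eq_nil]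
        omega
      · simp only [List.any_map, List.any_eq_true]
        rintro ⟨x, _, hx⟩
        simp [Function.comp, List.isEmpty_iff, List.range_eq_nil] at hx

-- the grid over positive Int dimensions, in Nat form
theorem pv_grid_nat (H W : Nat) :
    pvGrid (H : Int) (W : Int)
    = (List.range H).map (fun r => (List.range W).map
        (fun c => PySem.Int.toStr ((r * W + c : Nat) + 1))) := by
  unfold pvGrid
  have hr : ∀ (b : Nat), PySem.List.pyRange 0 (b : Int) 1 = (List.range b).map (Nat.cast : Nat → Int) := by
    intro b
    rw [PySem.List.pyRange_one]
    simp
  rw [hr H, List.map_map]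
  apply List.map_congr_left
  intro r _
  rw [hr W, Function.comp, List.map_map]
  apply List.map_congr_left
  intro c _
  simp [Function.comp]

theorem pv_main (H W : Nat) (hH : 0 < H) (hW : 0 < W) :
    generateSolutions ((H : Int), (W : Int)) = generateSolutions_alt ((H : Int), (W : Int)) := by
  have hNpos : 0 < H * W := Nat.mul_pos hH hW
  simp only [generateSolutions, generateSolutions_alt]
  -- B's components
  have hs1 : (pvGrid (H : Int) (W : Int)).flatten
      = (List.range (H * W)).map (fun k => PySem.Int.toStr ((k : Nat) + 1)) := by
    rw [pv_grid_nat, ← List.flatMap_def, pv_flatten H W (fun k => PySem.Int.toStr ((k : Nat) + 1))]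
  have hs2 : (pvZipStar (pvGrid (W : Int) (H : Int))).flatten
      = (List.range (H * W)).map (fun k => PySem.Int.toStr ((k % W * H + k / W : Nat) + 1)) := by
    rw [pv_grid_nat, pvZipStar_grid W H hW, ← List.flatMap_def,
        ← pv_flatten H W (fun k => PySem.Int.toStr ((k % W * H + k / W : Nat) + 1))]
    apply List.flatMap_congr
    intro i hi
    apply List.map_congr_left
    intro t ht
    rw [List.mem_range] at hi ht
    have hdiv : (i * W + t) / W = i := by
      rw [Nat.add_comm, Nat.add_mul_div_right _ _ hW, Nat.div_eq_of_lt ht, Nat.zero_add]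
    have hmod : (i * W + t) % W = t := by
      rw [Nat.add_comm, Nat.add_mul_mod_self_right, Nat.mod_eq_of_lt ht]
    rw [hdiv, hmod]
  rw [if_neg (by omega), hs1, hs2]
  -- A's components
  have hr : ∀ (b : Nat), PySem.List.pyRange 0 (b : Int) 1 = (List.range b).map (Nat.cast : Nat → Int) := by
    intro b
    rw [PySem.List.pyRange_one]
    simp
  simp only [hr H, hr W]
  rw [pv_outer_fold H W (fun x _ _ => if x ≠ (W : Int) * (H : Int) then PySem.Int.toStr x else "0")]
  rw [pv_outer_fold H W (fun x i j => if x ≠ (W : Int) * (H : Int) then PySem.Int.toStr (i + 1 + (H : Int) * j) else "0")]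
  refine congrArg₂ (fun a b => [a, b]) ?_ ?_
  · -- s1
    rw [← pv_last_replace (H * W) hNpos, ← pv_flatten H W]
    apply List.flatMap_congr
    intro i hi
    apply List.map_congr_left
    intro t ht
    rw [List.mem_range] at hi ht
    rw [show ((W : Int) * (H : Int)) = ((H * W : Nat) : Int) by push_cast; ring]
    by_cases hk : i * W + t + 1 = H * W
    · rw [if_neg (by push_cast; omega), if_pos hk]
    · rw [if_pos (by push_cast; omega), if_neg hk]
  · -- s2
    rw [← pv_last_replace (H * W) hNpos, ← pv_flatten H W]
    apply List.flatMap_congr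
    intro i hi
    apply List.map_congr_left
    intro t ht
    rw [List.mem_range] at hi ht
    rw [show ((W : Int) * (H : Int)) = ((H * W : Nat) : Int) by push_cast; ring]
    have hdiv : (i * W + t) / W = i := by
      rw [Nat.add_comm, Nat.add_mul_div_right _ _ hW, Nat.div_eq_of_lt ht, Nat.zero_add]
    have hmod : (i * W + t) % W = t := by
      rw [Nat.add_comm, Nat.add_mul_mod_self_right, Nat.mod_eq_of_lt ht]
    by_cases hk : i * W + t + 1 = H * W
    · rw [if_neg (by push_cast; omega), if_pos hk]
    · rw [if_pos (by push_cast; omega), if_neg hk]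
      congr 1
      rw [hdiv, hmod]
      push_cast
      ring

-- degenerate dimensions: both programs return [[], []]
theorem pv_degenerate (h w : Int) (hd : h ≤ 0 ∨ w ≤ 0) :
    generateSolutions (h, w) = generateSolutions_alt (h, w) := by
  simp only [generateSolutions, generateSolutions_alt]
  rw [if_pos hd]
  rcases hd with hh | hw
  · simp [PySem.List.pyRange_one_eq_nil hh]
  · simp [PySem.List.pyRange_one_eq_nil hw]

-- ===== VERDICT (by name: the statement is the Claim_ definition above) =====
theorem generateSolutions_spec : Claim_equal_generateSolutions := by
  intro ⟨h, w⟩ _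
  show generateSolutions (h, w) = generateSolutions_alt (h, w)
  by_cases hh : h ≤ 0
  · exact pv_degenerate h w (Or.inl hh)
  · by_cases hw : w ≤ 0
    · exact pv_degenerate h w (Or.inr hw)
    · have := pv_main h.toNat w.toNat (by omega) (by omega)
      rwa [Int.toNat_of_nonneg (by omega), Int.toNat_of_nonneg (by omega)] at this
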